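-- pv_equiv track=rewrite | github.com/henriquegodoi2024/python-oop-image-and-file-processing | image_transformations.py | fold_diag
-- ===== SOURCE A (Python) =====
-- def create_green_image(height, width):
--     """ creates and returns a 2-D list of pixels with height rows and
--         width columns in which all of the pixels are colored green.
--         inputs: height and width are non-negative integers
--     """
--     pixels = []
--
--     for r in range(height):
--         row = [[0, 255, 0]] * width
--         pixels += [row]
--
--     return pixels
--
-- def fold_diag(pixels):
--     ''' creates and returns a new 2-D list that folds the original image along its diagonal'''
--     white = [255,255,255]
--     height = len(pixels)
--     width = len(pixels[0])
--     new_pixels = create_green_image(height, width)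
--
--     for r in range(height):
--         for c in range(width):
--             if r == c:
--                 new_pixels[r][c] = pixels[r][c]
--
--             elif r > c:
--                 new_pixels[r][c] = white
--
--             else:
--                 new_pixels[r][c] = pixels[r][c]
--
--     return new_pixels
-- ===== SOURCE B (Python) =====
-- def fold_diag(pixels):
--     ''' creates and returns a new 2-D list that folds the original image along its diagonal'''
--     white = [255, 255, 255]
--     height = len(pixels)
--     width = len(pixels[0])
--     # build the result column by column: column c keeps the original pixels down
--     # to the diagonal and is white below it ...
--     cols = []
--     for c in range(width):
--         top = min(c + 1, height)
--         cols.append([pixels[r][c] for r in range(top)] + [white] * (height - top))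
--     # ... then transpose the columns back into rows
--     return [[cols[c][r] for c in range(width)] for r in range(height)]
-- ===== Notes on version B (the rewrite author's own statement) =====
-- stated objective: alternative
-- what changed: B traverses the image column-major: it builds each output column as original-pixels-down-to-the-diagonal plus a white tail, then transposes the columns back into rows, instead of A's preallocated green scaffold mutated cell by cell with a per-cell row/column comparison.
import Mathlib
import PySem

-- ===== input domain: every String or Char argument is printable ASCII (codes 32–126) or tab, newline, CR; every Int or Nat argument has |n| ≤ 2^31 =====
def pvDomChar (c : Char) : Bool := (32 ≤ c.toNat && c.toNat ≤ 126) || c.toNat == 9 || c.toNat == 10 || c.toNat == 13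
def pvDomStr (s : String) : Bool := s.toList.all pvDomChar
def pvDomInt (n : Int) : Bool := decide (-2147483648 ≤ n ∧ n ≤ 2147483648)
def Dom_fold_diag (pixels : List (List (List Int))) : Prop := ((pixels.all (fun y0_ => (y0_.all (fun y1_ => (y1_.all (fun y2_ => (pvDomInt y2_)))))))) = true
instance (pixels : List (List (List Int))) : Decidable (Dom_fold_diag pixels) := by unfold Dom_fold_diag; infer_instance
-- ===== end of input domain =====

-- B builds the image column-major (each column = diagonal-capped original column ++ white
-- tail) and transposes, instead of A's mutated green scaffold (objective: alternative).
-- Equivalence is about the RETURN value; neither program mutates its argument.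

-- ===== PORT A =====
-- Python list assignment np[r][c] = v for the in-range non-negative indices A uses (exact there).
def pySet2 (xs : List (List (List Int))) (r c : Int) (v : List Int) : List (List (List Int)) :=
  xs.set r.toNat ((xs.getD r.toNat []).set c.toNat v)

def create_green_image (height width : Int) : List (List (List Int)) :=
  (PySem.List.pyRange 0 height 1).foldl
    (fun pixels _ => pixels ++ [List.replicate width.toNat ([0, 255, 0] : List Int)]) []

def fold_diag (pixels : List (List (List Int))) : List (List (List Int)) :=
  let white : List Int := [255, 255, 255]
  let height : Int := pixels.length
  -- pixels[0]: headD is exact on Pre_ (pixels ≠ []); Python raises IndexError on []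
  let width : Int := (pixels.headD []).length
  let new_pixels := create_green_image height width
  (PySem.List.pyRange 0 height 1).foldl (fun np r =>
    (PySem.List.pyRange 0 width 1).foldl (fun np c =>
      if r == c then pySet2 np r c ((pixels.getD r.toNat []).getD c.toNat [])
      else if r > c then pySet2 np r c white
      else pySet2 np r c ((pixels.getD r.toNat []).getD c.toNat [])) np) new_pixels

-- ===== PORT B =====
-- the 'for c in range(width): cols.append(...)' loop appending one element per index is the
-- map over List.range; the two comprehensions are maps; pixels[r][c] / cols[c][r] are getD
-- (exact: B only reads in-range non-negative indices on Pre_).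
def fold_diag_alt (pixels : List (List (List Int))) : List (List (List Int)) :=
  let white : List Int := [255, 255, 255]
  let height : Nat := pixels.length
  let width : Nat := (pixels.headD []).length
  let cols : List (List (List Int)) :=
    (List.range width).map (fun c =>
      let top := min (c + 1) height
      (List.range top).map (fun r => (pixels.getD r []).getD c [])
        ++ List.replicate (height - top) white)
  (List.range height).map (fun r => (List.range width).map (fun c => (cols.getD c []).getD r []))

-- ===== PRECONDITION & SPEC =====
-- Pre_ holds exactly where Python A returns: pixels non-empty (else len(pixels[0]) raises
-- IndexError) and every row r with r < width long enough for the reads pixels[r][r..width-1].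
def Pre_fold_diag (pixels : List (List (List Int))) : Prop :=
  pixels ≠ [] ∧ ∀ r ∈ List.range pixels.length, r < (pixels.headD []).length →
    (pixels.headD []).length ≤ (pixels.getD r []).length
instance (pixels : List (List (List Int))) : Decidable (Pre_fold_diag pixels) := by
  unfold Pre_fold_diag; infer_instance

def pvWitness_fold_diag : List (List (List Int)) :=
  [[[1, 2, 3], [4, 5, 6]], [[7, 8, 9], [10, 11, 12]]]

def Spec_fold_diag (pixels : List (List (List Int))) (out : List (List (List Int))) : Prop := out = fold_diag_alt pixels
instance (pixels : List (List (List Int))) (out : List (List (List Int))) : Decidable (Spec_fold_diag pixels out) := by unfold Spec_fold_diag; infer_instance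

-- ===== CLAIM (what is proved, stated in full; the proofs are below) =====
def Claim_equal_fold_diag : Prop := ∀ (pixels : List (List (List Int))), Dom_fold_diag pixels → Pre_fold_diag pixels → Spec_fold_diag pixels (fold_diag pixels)

-- ===== LEMMAS AND PROOFS =====

-- writing positions 0..k-1 of a list of length ≥ k replaces its k-prefix
theorem foldl_range_set {α : Type} (g : Nat → α) :
    ∀ (k : Nat) (l : List α), k ≤ l.length →
      (List.range k).foldl (fun acc c => acc.set c (g c)) l
        = (List.range k).map g ++ l.drop k := by
  intro k
  induction k with
  | zero => simp
  | succ k ih =>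
    intro l hk
    simp only [List.range_succ, List.foldl_append, List.foldl_cons, List.foldl_nil,
      List.map_append, List.map_cons, List.map_nil]
    rw [ih l (by omega)]
    rw [List.set_append_right _ _ (by simp)]
    have h1 : (List.drop k l).set (k - (List.map g (List.range k)).length) (g k)
        = g k :: List.drop (k + 1) l := by
      obtain ⟨a, t, ht⟩ : ∃ a t, List.drop k l = a :: t := by
        cases hd : List.drop k l with
        | nil => exfalso; have := List.length_drop (l := l) (i := k); rw [hd] at this; simp at this; omega
        | cons a t => exact ⟨a, t, rfl⟩
      have h2 : List.drop (k + 1) l = t := by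
        have := List.drop_drop (i := 1) (j := k) (l := l); rw [ht] at this
        simpa using this.symm
      simp [ht, h2]
    rw [h1]
    simp

-- the inner per-row mutation loop is a set of the whole row r
theorem foldl_set_row (r : Nat) (g : Nat → List Int) :
    ∀ (k : Nat) (np : List (List (List Int))), r < np.length →
      (List.range k).foldl (fun np c => np.set r ((np.getD r []).set c (g c))) np
        = np.set r ((List.range k).foldl (fun row c => row.set c (g c)) (np.getD r [])) := by
  intro k
  induction k with
  | zero => intro np h; simp [List.getD, List.getElem?_eq_getElem h]
  | succ k ih =>
    intro np h
    simp only [List.range_succ, List.foldl_append, List.foldl_cons, List.foldl_nil]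
    rw [ih np h]
    have hlen : r < (np.set r ((List.range k).foldl (fun row c => row.set c (g c)) (np.getD r []))).length := by
      simpa using h
    rw [List.set_set]
    congr 1
    simp [List.getD, List.getElem?_set_self', List.getElem?_eq_getElem h]

-- the full nested loop: row r of the scaffold is overwritten with (range w).map (g r)
theorem outer_combined (g : Nat → Nat → List Int) (w : Nat) :
    ∀ (k : Nat) (np : List (List (List Int))), k ≤ np.length →
      (∀ i, i < np.length → (np.getD i []).length = w) →
      (List.range k).foldl
        (fun np r => (List.range w).foldl (fun np c => np.set r ((np.getD r []).set c (g r c))) np) np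
        = (List.range k).map (fun r => (List.range w).map (g r)) ++ np.drop k := by
  intro k
  induction k with
  | zero => simp
  | succ k ih =>
    intro np hk hrows
    simp only [List.range_succ, List.foldl_append, List.foldl_cons, List.foldl_nil,
      List.map_append, List.map_cons, List.map_nil]
    rw [ih np (by omega) hrows]
    have hklt : k < np.length := by omega
    have hlen : k < ((List.range k).map (fun r => (List.range w).map (g r)) ++ np.drop k).length := by
      simp; omega
    rw [foldl_set_row k (g k) w _ hlen]
    have hget : ((List.range k).map (fun r => (List.range w).map (g r))
        ++ np.drop k).getD k [] = np.getD k [] := by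
      rw [List.getD_append_right _ _ _ _ (by simp)]
      simp [List.getD, List.getElem?_drop, List.getElem?_eq_getElem hklt]
    rw [hget]
    rw [foldl_range_set (g k) w (np.getD k []) (hrows k hklt).ge]
    rw [List.drop_eq_nil_of_le (as := np.getD k []) (hrows k hklt).le, List.append_nil]
    rw [List.set_append_right _ _ (by simp)]
    rw [List.append_assoc]
    congr 1
    obtain ⟨a, tl, htl⟩ : ∃ a tl, List.drop k np = a :: tl := by
      cases hd : List.drop k np with
      | nil => exfalso; have := List.length_drop (l := np) (i := k); rw [hd] at this; simp at this; omega
      | cons a tl => exact ⟨a, tl, rfl⟩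
    have h2 : List.drop (k + 1) np = tl := by
      have := List.drop_drop (i := 1) (j := k) (l := np); rw [htl] at this
      simpa using this.symm
    simp [htl, h2]

-- A's result in closed form (h = height, w = width, no precondition needed at this level)
theorem fold_diag_closed (pixels : List (List (List Int))) :
    fold_diag pixels
      = (List.range pixels.length).map (fun r =>
          (List.range (pixels.headD []).length).map (fun c =>
            if r = c then (pixels.getD r []).getD c []
            else if c < r then ([255, 255, 255] : List Int)
            else (pixels.getD r []).getD c [])) := by
  unfold fold_diag create_green_image pySet2
  simp only [PySem.List.pyRange_zero_natCast, List.foldl_map]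
  rw [PySem.List.foldl_append_singleton_eq_map]
  simp only [List.nil_append, List.map_const', List.length_range, Int.toNat_natCast,
    beq_iff_eq, Nat.cast_inj, gt_iff_lt, Nat.cast_lt]
  have hbody : ∀ (y : Nat), (fun (x : List (List (List Int))) (y_1 : Nat) =>
        if y = y_1 then x.set y ((x.getD y []).set y_1 ((pixels.getD y []).getD y_1 []))
        else
          if y_1 < y then x.set y ((x.getD y []).set y_1 ([255, 255, 255] : List Int))
          else x.set y ((x.getD y []).set y_1 ((pixels.getD y []).getD y_1 [])))
      = (fun (x : List (List (List Int))) (y_1 : Nat) => x.set y ((x.getD y []).set y_1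
          (if y = y_1 then (pixels.getD y []).getD y_1 []
           else if y_1 < y then ([255, 255, 255] : List Int)
           else (pixels.getD y []).getD y_1 []))) := by
    intro y; funext x y_1; split_ifs <;> rfl
  simp only [hbody]
  rw [outer_combined
    (fun r c => if r = c then (pixels.getD r []).getD c []
      else if c < r then ([255, 255, 255] : List Int) else (pixels.getD r []).getD c [])
    (pixels.headD []).length pixels.length _ (by simp) ?_]
  · simp
  · intro i hi
    simp only [List.length_replicate] at hi
    simp [List.getD, hi]

-- reading entry (r, c) of B's columns: original pixel on/above the diagonal, white below
theorem col_entry (pixels : List (List (List Int))) (r c : Nat)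
    (hr : r < pixels.length) :
    ((List.range (min (c + 1) pixels.length)).map (fun r' => (pixels.getD r' []).getD c [])
        ++ List.replicate (pixels.length - min (c + 1) pixels.length)
            ([255, 255, 255] : List Int)).getD r []
      = if r ≤ c then (pixels.getD r []).getD c [] else ([255, 255, 255] : List Int) := by
  set t := min (c + 1) pixels.length with ht
  by_cases h : r ≤ c
  · have hrt : r < t := by omega
    rw [if_pos h, List.getD_append _ _ _ _ (by simpa using hrt)]
    simp [List.getD, List.getElem?_map, List.getElem?_range hrt]
  · have hrt : t ≤ r := by omega
    rw [if_neg h, List.getD_append_right _ _ _ _ (by simpa using hrt)]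
    simp only [List.length_map, List.length_range]
    have : r - t < pixels.length - t := by omega
    simp [List.getD, this]

-- ===== VERDICT (by name: the statement is the Claim_ definition above) =====
theorem fold_diag_spec : Claim_equal_fold_diag := by
  intro pixels _ _
  unfold Spec_fold_diag fold_diag_alt
  rw [fold_diag_closed]
  apply List.ext_getElem
  · simp
  · intro i h1 h2
    simp only [List.length_map, List.length_range] at h1
    simp only [List.getElem_map, List.getElem_range]
    apply List.ext_getElem
    · simp
    · intro j hj1 hj2
      simp only [List.length_map, List.length_range] at hj1
      simp only [List.getElem_map, List.getElem_range]
      have hcols : (((List.range (pixels.headD []).length).map (fun c =>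
          (List.range (min (c + 1) pixels.length)).map (fun r => (pixels.getD r []).getD c [])
            ++ List.replicate (pixels.length - min (c + 1) pixels.length)
                ([255, 255, 255] : List Int))).getD j [])
          = (List.range (min (j + 1) pixels.length)).map (fun r => (pixels.getD r []).getD j [])
            ++ List.replicate (pixels.length - min (j + 1) pixels.length)
                ([255, 255, 255] : List Int) := by
        rw [List.getD_eq_getElem?_getD, List.getElem?_map, List.getElem?_range hj1]; rfl
      rw [hcols, col_entry pixels i j h1]
      rcases Nat.lt_trichotomy i j with h | h | h
      · simp [Nat.ne_of_lt h, Nat.not_lt.mpr (Nat.le_of_lt h), Nat.le_of_lt h]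
      · simp [h]
      · simp [Nat.ne_of_gt h, h, Nat.not_le.mpr h]
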